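-- pv_equiv track=rewrite | github.com/Pharallaxe/algorithms | ascii/spirale_ulam/spirale_ulam.py | spirale_ulam_detaillee
-- ===== SOURCE A (Python) =====
-- def spirale_ulam_detaillee(n):
--     grille = [[5, 4, 3], [6, 1, 2], [7, 8, 9]]
--     inc = 6
--     dernier = 9
--
--     while inc < n * 2:
--         b0 = grille[0]
--
--         # Traiter la ligne du bas.
--         if inc % 4 == 2:
--             n_grille = []
--             for i in range(0, len(grille)):
--                 el = len(grille[0]) - i + dernier
--                 n_ligne = grille[i] + [el]
--                 n_grille.append(n_ligne)
--             grille = n_grille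
--
--         # Traiter la ligne du haut.
--         elif inc % 4 == 3:
--             n_ligne = []
--             for i in range(len(b0), 0, -1):
--                 n_ligne.append(dernier + i)
--             grille.insert(0, n_ligne)
--             dernier += len(b0) + 1
--
--         # Traiter la colonne de gauche.
--         elif inc % 4 == 0:
--             for i in range(0, len(grille)):
--                 n_colonne = []
--                 for j in range(len(grille[i])):
--                     n_colonne.append(dernier + j)
--                 grille[i]=[dernier+i] + grille[i]
--             dernier += len(grille)
--
--         # Traiter la colonne de droite.
--         elif inc % 4 == 1:
--             n_colonne = []
--             for i in range(0, len(b0)):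
--                 n_colonne.append(dernier + i)
--             grille.append(n_colonne)
--             dernier += len(b0) - 1
--
--         inc += 1
--     return grille
-- ===== SOURCE B (Python) =====
-- def spirale_ulam_detaillee(n):
--     # One pass over a preallocated n x n result; each cell computed by a
--     # closed-form ring formula (O(n^2)) instead of growing the grid side by side.
--     s = n if n >= 4 else 3
--     cr = s // 2              # row of the central 1
--     cc = s - s // 2 - 1      # column of the central 1
--     base = [[5, 4, 3], [6, 1, 2], [7, 8, 9]]
--
--     def cell(y, x):
--         # (y, x) = coordinates relative to the centre cell
--         if -1 <= x <= 1 and -1 <= y <= 1: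
--             return base[y + 1][x + 1]
--         te = max(-y, y + 1, 1 - x, x)      # smallest even ring 2*te containing the cell
--         to = max(y, -y, x, -x)             # smallest odd ring 2*to+1 containing the cell
--         if 2 * te < 2 * to + 1:
--             t = te                          # even ring: top row or right column
--             return 3*t*t - t + 2 - x if y == -t else 3*t*t - t + 1 - y
--         t = to                              # odd ring: bottom row or left column
--         return 3*t*t + 3*t + 2 + x if y == t else 3*t*t + t + 2 + y
--
--     return [[cell(i - cr, j - cc) for j in range(s)] for i in range(s)]
-- ===== Notes on version B (the rewrite author's own statement) =====
-- stated objective: faster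
-- what changed: Instead of growing the grid side by side in a while loop (copying rows every step), B fills a preallocated n x n table in one pass, computing each cell directly from a closed-form ring formula in centre-relative coordinates.
import Mathlib
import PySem

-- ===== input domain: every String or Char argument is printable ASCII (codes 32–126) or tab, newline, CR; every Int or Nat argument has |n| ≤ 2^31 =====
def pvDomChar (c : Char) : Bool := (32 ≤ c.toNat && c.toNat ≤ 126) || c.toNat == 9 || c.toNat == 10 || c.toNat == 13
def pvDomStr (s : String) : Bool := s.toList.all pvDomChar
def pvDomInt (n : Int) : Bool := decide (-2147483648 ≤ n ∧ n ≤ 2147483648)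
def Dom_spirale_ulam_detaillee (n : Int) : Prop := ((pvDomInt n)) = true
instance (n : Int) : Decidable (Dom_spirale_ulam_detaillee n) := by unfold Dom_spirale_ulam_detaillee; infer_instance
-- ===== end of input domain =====

-- B replaces A's grow-and-copy while loop by a one-pass fill of the n×n grid,
-- each cell computed by a closed-form ring formula (objective: faster).


-- ===== PORT A =====

-- one iteration of A's while-loop body (the four inc%4 branches), returning (grille, dernier)
def spirale_body (grille : List (List Int)) (inc dernier : Int) : List (List Int) × Int :=
  -- b0 = grille[0]; the grid is never empty, so the [] default is never taken
  let b0 := PySem.List.pyGetD grille 0 []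
  if PySem.Int.mod inc 4 = 2 then
    -- n_grille = []; for i in range(0, len(grille)): n_grille.append(grille[i] + [len(grille[0]) - i + dernier])
    ((PySem.List.pyRange 0 (grille.length : Int) 1).foldl
      (fun n_grille i =>
        n_grille ++ [PySem.List.pyGetD grille i []
          ++ [((PySem.List.pyGetD grille 0 []).length : Int) - i + dernier]]) [],
     dernier)
  else if PySem.Int.mod inc 4 = 3 then
    -- n_ligne = []; for i in range(len(b0), 0, -1): n_ligne.append(dernier + i); grille.insert(0, n_ligne)
    let n_ligne := (PySem.List.pyRange (b0.length : Int) 0 (-1)).foldl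
      (fun acc i => acc ++ [dernier + i]) []
    (PySem.List.insert grille 0 n_ligne, dernier + (b0.length : Int) + 1)
  else if PySem.Int.mod inc 4 = 0 then
    -- for i in range(0, len(grille)): grille[i] = [dernier + i] + grille[i]
    -- (the inner n_colonne loop of A is dead code: n_colonne is never read; it is omitted)
    let grille' := (PySem.List.pyRange 0 (grille.length : Int) 1).foldl
      (fun g i => PySem.List.pySetD g i ([dernier + i] ++ PySem.List.pyGetD g i [])) grille
    (grille', dernier + (grille'.length : Int))
  else if PySem.Int.mod inc 4 = 1 then
    -- n_colonne = []; for i in range(0, len(b0)): n_colonne.append(dernier + i); grille.append(n_colonne)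
    let n_colonne := (PySem.List.pyRange 0 (b0.length : Int) 1).foldl
      (fun acc i => acc ++ [dernier + i]) []
    (grille ++ [n_colonne], dernier + (b0.length : Int) - 1)
  else (grille, dernier)  -- unreachable: inc % 4 ∈ {0,1,2,3}

def spirale_loop (n : Int) (grille : List (List Int)) (inc dernier : Int) : List (List Int) :=
  if h : inc < n * 2 then
    let p := spirale_body grille inc dernier
    spirale_loop n p.1 (inc + 1) p.2
  else grille
termination_by (n * 2 - inc).toNat
decreasing_by omega

def spirale_ulam_detaillee (n : Int) : List (List Int) :=
  spirale_loop n [[5, 4, 3], [6, 1, 2], [7, 8, 9]] 6 9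

-- ===== PORT B =====

-- value of the cell at centre-relative coordinates (y, x) (closed-form ring formula)
def ulamCell (y x : Int) : Int :=
  if -1 ≤ x ∧ x ≤ 1 ∧ -1 ≤ y ∧ y ≤ 1 then
    PySem.List.pyGetD (PySem.List.pyGetD [[5, 4, 3], [6, 1, 2], [7, 8, 9]] (y + 1) []) (x + 1) 0
  else
    let te := max (max (-y) (y + 1)) (max (1 - x) x)   -- smallest even ring 2*te containing the cell
    let tq := max (max y (-y)) (max x (-x))            -- smallest odd ring 2*to+1 containing the cell
    if 2 * te < 2 * tq + 1 then
      if y = -te then 3 * te * te - te + 2 - x else 3 * te * te - te + 1 - y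
    else
      if y = tq then 3 * tq * tq + 3 * tq + 2 + x else 3 * tq * tq + tq + 2 + y

def spirale_ulam_detaillee_alt (n : Int) : List (List Int) :=
  let s := if 4 ≤ n then n else 3
  let cr := PySem.Int.floordiv s 2
  let cc := s - PySem.Int.floordiv s 2 - 1
  (PySem.List.pyRange 0 s 1).map (fun i =>
    (PySem.List.pyRange 0 s 1).map (fun j => ulamCell (i - cr) (j - cc)))

-- ===== PRECONDITION & SPEC =====
def Spec_spirale_ulam_detaillee (n : Int) (out : List (List Int)) : Prop := out = spirale_ulam_detaillee_alt n
instance (n : Int) (out : List (List Int)) : Decidable (Spec_spirale_ulam_detaillee n out) := by unfold Spec_spirale_ulam_detaillee; infer_instance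

-- ===== CLAIM (what is proved, stated in full; the proofs are below) =====
def Claim_equal_spirale_ulam_detaillee : Prop := ∀ (n : Int), Dom_spirale_ulam_detaillee n → Spec_spirale_ulam_detaillee n (spirale_ulam_detaillee n)

-- ===== LEMMAS AND PROOFS =====

-- the grid of size m as B computes it
def tblRow (m i : Int) : List Int :=
  (PySem.List.pyRange 0 m 1).map (fun j =>
    ulamCell (i - PySem.Int.floordiv m 2) (j - (m - PySem.Int.floordiv m 2 - 1)))

def tbl (m : Int) : List (List Int) :=
  (PySem.List.pyRange 0 m 1).map (fun i => tblRow m i)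

-- A's "dernier" after the grid has reached size m
def dval (m : Int) : Int :=
  if PySem.Int.mod m 2 = 0 then 3 * (PySem.Int.floordiv m 2) * (PySem.Int.floordiv m 2) + 2
  else 3 * (PySem.Int.floordiv m 2) * (PySem.Int.floordiv m 2) + 4 * (PySem.Int.floordiv m 2) + 2

lemma dval_even (t : Int) : dval (2 * t) = 3 * t * t + 2 := by
  unfold dval
  rw [PySem.Int.mod_eq_emod_of_pos, PySem.Int.floordiv_eq_ediv_of_pos] <;> try omega
  have h1 : (2 * t) % 2 = 0 := by omega
  have h2 : (2 * t) / 2 = t := by omega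
  simp [h1, h2]

lemma dval_odd (t : Int) : dval (2 * t + 1) = 3 * t * t + 4 * t + 2 := by
  unfold dval
  rw [PySem.Int.mod_eq_emod_of_pos, PySem.Int.floordiv_eq_ediv_of_pos] <;> try omega
  have h1 : (2 * t + 1) % 2 = 1 := by omega
  have h2 : (2 * t + 1) / 2 = t := by omega
  simp [h1, h2]

-- ulamCell on the four boundary pieces of a ring
lemma u_top (t x : Int) (ht : 2 ≤ t) (h1 : -(t - 1) ≤ x) (h2 : x ≤ t) :
    ulamCell (-t) x = 3 * t * t - t + 2 - x := by
  unfold ulamCell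
  rw [if_neg (by omega)]
  have hte : max (max (-(-t)) ((-t) + 1)) (max (1 - (x)) (x)) = t := by simp only [max_def]; split_ifs <;> omega
  have htq : max (max (-t) (-(-t))) (max (x) (-(x))) = t := by simp only [max_def]; split_ifs <;> omega
  simp only [hte, htq]
  split_ifs <;> omega
lemma u_right (t y : Int) (ht : 2 ≤ t) (h1 : -(t - 1) ≤ y) (h2 : y ≤ t - 1) :
    ulamCell y t = 3 * t * t - t + 1 - y := by
  unfold ulamCell
  rw [if_neg (by omega)]
  have hte : max (max (-(y)) ((y) + 1)) (max (1 - (t)) (t)) = t := by simp only [max_def]; split_ifs <;> omega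
  have htq : max (max (y) (-(y))) (max (t) (-(t))) = t := by simp only [max_def]; split_ifs <;> omega
  simp only [hte, htq]
  split_ifs <;> omega
lemma u_left (t y : Int) (ht : 2 ≤ t) (h1 : -t ≤ y) (h2 : y ≤ t - 1) :
    ulamCell y (-t) = 3 * t * t + t + 2 + y := by
  unfold ulamCell
  rw [if_neg (by omega)]
  have hte : max (max (-(y)) ((y) + 1)) (max (1 - (-t)) (-t)) = t + 1 := by simp only [max_def]; split_ifs <;> omega
  have htq : max (max (y) (-(y))) (max (-t) (-(-t))) = t := by simp only [max_def]; split_ifs <;> omega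
  simp only [hte, htq]
  split_ifs <;> omega
lemma u_bottom (t x : Int) (ht : 2 ≤ t) (h1 : -t ≤ x) (h2 : x ≤ t) :
    ulamCell t x = 3 * t * t + 3 * t + 2 + x := by
  unfold ulamCell
  rw [if_neg (by omega)]
  have hte : max (max (-(t)) ((t) + 1)) (max (1 - (x)) (x)) = t + 1 := by simp only [max_def]; split_ifs <;> omega
  have htq : max (max (t) (-(t))) (max (x) (-(x))) = t := by simp only [max_def]; split_ifs <;> omega
  simp only [hte, htq]
  split_ifs <;> omega

lemma tbl_length (m : Int) : (tbl m).length = m.toNat := by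
  simp [tbl, PySem.List.length_pyRange_one]
lemma tbl_get (m i : Int) (h0 : 0 ≤ i) (h1 : i < m) :
    PySem.List.pyGetD (tbl m) i [] = tblRow m i := by
  unfold tbl
  exact PySem.List.pyGetD_map_pyRange_of_nonneg _ m i _ h0 h1
lemma tblRow_length (m i : Int) : (tblRow m i).length = m.toNat := by
  simp [tblRow, PySem.List.length_pyRange_one]

-- the in-place left-column loop of A, on a grid that is a map over a range
lemma foldl_pySetD_aux (L : Nat) (w : Int → List Int) (u : Int → List Int → List Int) :
    ∀ (k a : Nat), a + k = L →
    (PySem.List.pyRange (a : Int) (L : Int) 1).foldl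
      (fun g i => PySem.List.pySetD g i (u i (PySem.List.pyGetD g i [])))
      ((PySem.List.pyRange 0 (L : Int) 1).map (fun i => if i < (a : Int) then u i (w i) else w i))
    = (PySem.List.pyRange 0 (L : Int) 1).map (fun i => u i (w i)) := by
  intro k
  induction k with
  | zero =>
    intro a ha
    rw [show PySem.List.pyRange (a : Int) (L : Int) 1 = [] from PySem.List.pyRange_one_eq_nil (by omega)]
    simp only [List.foldl_nil]
    apply List.map_congr_left
    intro i hi
    rw [PySem.List.mem_pyRange_one] at hi
    rw [if_pos (by omega)]
  | succ k ih =>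
    intro a ha
    rw [PySem.List.pyRange_one_cons (by omega : (a : Int) < (L : Int))]
    simp only [List.foldl_cons]
    have hget : PySem.List.pyGetD
        ((PySem.List.pyRange 0 (L : Int) 1).map (fun i => if i < (a : Int) then u i (w i) else w i))
        (a : Int) [] = w a := by
      rw [PySem.List.pyGetD_map_pyRange_of_nonneg _ _ _ _ (by omega) (by omega)]
      simp
    rw [hget]
    have hset : PySem.List.pySetD
        ((PySem.List.pyRange 0 (L : Int) 1).map (fun i => if i < (a : Int) then u i (w i) else w i))
        (a : Int) (u (a : Int) (w a))
        = (PySem.List.pyRange 0 (L : Int) 1).map (fun i => if i < ((a : Int) + 1) then u i (w i) else w i) := by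
      rw [PySem.List.pySetD_of_nonneg _ _ (by omega)]
      apply List.ext_getElem
      · simp
      · intro idx h1 h2
        simp only [List.getElem_set, List.getElem_map, PySem.List.getElem_pyRange_one, zero_add]
        rcases eq_or_ne ((a : Int)).toNat idx with hia | hia
        · rw [if_pos hia, if_pos (by omega)]
          have : ((idx : Int)) = (a : Int) := by omega
          rw [this]
        · rw [if_neg hia]
          by_cases hlt : ((idx : Int)) < (a : Int)
          · rw [if_pos hlt, if_pos (by omega)]
          · rw [if_neg hlt, if_neg (by omega)]
    rw [hset]
    have := ih (a + 1) (by omega)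
    push_cast at this ⊢
    exact this

lemma foldl_pySetD_map (L : Nat) (w : Int → List Int) (u : Int → List Int → List Int) :
    (PySem.List.pyRange 0 (L : Int) 1).foldl
      (fun g i => PySem.List.pySetD g i (u i (PySem.List.pyGetD g i [])))
      ((PySem.List.pyRange 0 (L : Int) 1).map w)
    = (PySem.List.pyRange 0 (L : Int) 1).map (fun i => u i (w i)) := by
  have h0 : ((PySem.List.pyRange 0 (L : Int) 1).map w)
      = (PySem.List.pyRange 0 (L : Int) 1).map (fun i => if i < ((0 : Nat) : Int) then u i (w i) else w i) := by
    apply List.map_congr_left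
    intro i hi
    rw [PySem.List.mem_pyRange_one] at hi
    rw [if_neg (by omega)]
  rw [h0]
  have := foldl_pySetD_aux L w u L 0 (by omega)
  push_cast at this ⊢
  exact this

lemma fd_even (t : Int) : PySem.Int.floordiv (2 * t) 2 = t := by
  rw [PySem.Int.floordiv_eq_ediv_of_pos (by omega)]; omega
lemma fd_odd (t : Int) : PySem.Int.floordiv (2 * t + 1) 2 = t := by
  rw [PySem.Int.floordiv_eq_ediv_of_pos (by omega)]; omega
lemma fd_even2 (t : Int) : PySem.Int.floordiv (2 * t + 2) 2 = t + 1 := by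
  rw [PySem.Int.floordiv_eq_ediv_of_pos (by omega)]; omega

-- intermediate grids after the first iteration of each pair
def gmidE (t : Int) : List (List Int) :=
  (PySem.List.pyRange 0 (2 * t + 1) 1).map
    (fun i => tblRow (2 * t + 1) i ++ [2 * t + 1 - i + dval (2 * t + 1)])
def gmidO (t : Int) : List (List Int) :=
  (PySem.List.pyRange 0 (2 * t) 1).map
    (fun i => (dval (2 * t) + i) :: tblRow (2 * t) i)

lemma row_even_top (t : Int) (ht : 1 ≤ t) :
    tblRow (2 * t + 2) 0 = (PySem.List.pyRange (2 * t + 2) 0 (-1)).map (fun i => dval (2 * t + 1) + i) := by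
  unfold tblRow
  rw [fd_even2, dval_odd, PySem.List.pyRange_zero, PySem.List.pyRange_neg_one, List.map_map, List.map_map]
  rw [show ((2 * t + 2 - 0 : Int)).toNat = ((2 * t + 2 : Int)).toNat from by omega]
  apply List.map_congr_left
  intro k hk
  rw [List.mem_range] at hk
  have hk' : (k : Int) < 2 * t + 2 := by omega
  simp only [Function.comp_apply]
  rw [show (0 : Int) - (t + 1) = -(t + 1) from by ring,
      show ((k : Int) - (2 * t + 2 - (t + 1) - 1)) = (k : Int) - t from by ring,
      u_top (t + 1) ((k : Int) - t) (by omega) (by omega) (by omega)]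
  ring

lemma row_even_rest (t i : Int) (ht : 1 ≤ t) (h0 : 0 ≤ i) (h1 : i < 2 * t + 1) :
    tblRow (2 * t + 2) (i + 1) = tblRow (2 * t + 1) i ++ [2 * t + 1 - i + dval (2 * t + 1)] := by
  unfold tblRow
  rw [fd_even2, fd_odd,
      show (2 * t + 2 : Int) = (2 * t + 1) + 1 from by ring,
      PySem.List.pyRange_one_succ_right (by omega), List.map_append]
  congr 1
  · apply List.map_congr_left
    intro j hj
    rw [PySem.List.mem_pyRange_one] at hj
    rw [show (i + 1 - (t + 1) : Int) = i - t from by ring,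
        show (j - (2 * t + 1 + 1 - (t + 1) - 1) : Int) = j - (2 * t + 1 - t - 1) from by ring]
  · rw [List.map_singleton,
        show (i + 1 - (t + 1) : Int) = i - t from by ring,
        show (2 * t + 1 - (2 * t + 1 + 1 - (t + 1) - 1) : Int) = t + 1 from by ring,
        u_right (t + 1) (i - t) (by omega) (by omega) (by omega), dval_odd]
    congr 1
    ring

lemma row_odd_rest (t i : Int) (ht : 2 ≤ t) (h0 : 0 ≤ i) (h1 : i < 2 * t) :
    tblRow (2 * t + 1) i = (dval (2 * t) + i) :: tblRow (2 * t) i := by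
  unfold tblRow
  rw [fd_odd, fd_even, PySem.List.pyRange_one_cons (by omega : (0 : Int) < 2 * t + 1), List.map_cons]
  congr 1
  · rw [show (0 - (2 * t + 1 - t - 1) : Int) = -t from by ring,
        u_left t (i - t) (by omega) (by omega) (by omega), dval_even]
    ring
  · rw [PySem.List.pyRange_one, PySem.List.pyRange_one, List.map_map, List.map_map]
    rw [show ((2 * t + 1 - (0 + 1) : Int)).toNat = ((2 * t - 0 : Int)).toNat from by omega]
    apply List.map_congr_left
    intro k hk
    simp only [Function.comp_apply]
    congr 1
    push_cast
    ring

lemma row_odd_bottom (t : Int) (ht : 2 ≤ t) :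
    tblRow (2 * t + 1) (2 * t) = (PySem.List.pyRange 0 (2 * t + 1) 1).map (fun i => dval (2 * t) + 2 * t + i) := by
  unfold tblRow
  rw [fd_odd]
  apply List.map_congr_left
  intro j hj
  rw [PySem.List.mem_pyRange_one] at hj
  rw [show (2 * t - t : Int) = t from by ring,
      show (j - (2 * t + 1 - t - 1) : Int) = j - t from by ring,
      u_bottom t (j - t) (by omega) (by omega) (by omega), dval_even]
  ring

lemma foldl_pySetD_map_int (M : Int) (hM : 0 ≤ M) (w : Int → List Int) (u : Int → List Int → List Int) :
    (PySem.List.pyRange 0 M 1).foldl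
      (fun g i => PySem.List.pySetD g i (u i (PySem.List.pyGetD g i [])))
      ((PySem.List.pyRange 0 M 1).map w)
    = (PySem.List.pyRange 0 M 1).map (fun i => u i (w i)) := by
  rw [show M = ((M.toNat : Nat) : Int) from by omega]
  exact foldl_pySetD_map M.toNat w u

lemma body_even1 (t : Int) (ht : 1 ≤ t) :
    spirale_body (tbl (2 * t + 1)) (2 * (2 * t + 1)) (dval (2 * t + 1)) = (gmidE t, dval (2 * t + 1)) := by
  have hmod : PySem.Int.mod (2 * (2 * t + 1)) 4 = 2 := by
    rw [PySem.Int.mod_eq_emod_of_pos (by omega)]; omega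
  simp only [spirale_body, hmod]
  rw [if_pos trivial]
  have hlen : ((tbl (2 * t + 1)).length : Int) = 2 * t + 1 := by rw [tbl_length]; omega
  have hget0 : PySem.List.pyGetD (tbl (2 * t + 1)) 0 [] = tblRow (2 * t + 1) 0 :=
    tbl_get _ _ (by omega) (by omega)
  have hrl : ((tblRow (2 * t + 1) 0).length : Int) = 2 * t + 1 := by rw [tblRow_length]; omega
  simp only [hlen, hget0, hrl]
  rw [PySem.List.foldl_congr_mem _ _
      (fun acc i => acc ++ [tblRow (2 * t + 1) i ++ [2 * t + 1 - i + dval (2 * t + 1)]]) _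
      (by intro acc i hi
          rw [PySem.List.mem_pyRange_one] at hi
          rw [tbl_get _ _ hi.1 hi.2])]
  rw [PySem.List.foldl_append_singleton_eq_map
      (fun i => tblRow (2 * t + 1) i ++ [2 * t + 1 - i + dval (2 * t + 1)])]
  rfl

lemma body_even2 (t : Int) (ht : 1 ≤ t) :
    spirale_body (gmidE t) (2 * (2 * t + 1) + 1) (dval (2 * t + 1)) = (tbl (2 * t + 2), dval (2 * t + 2)) := by
  have hmod : PySem.Int.mod (2 * (2 * t + 1) + 1) 4 = 3 := by
    rw [PySem.Int.mod_eq_emod_of_pos (by omega)]; omega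
  simp only [spirale_body, hmod]
  rw [if_neg (by norm_num), if_pos trivial]
  have hget0 : PySem.List.pyGetD (gmidE t) 0 [] = tblRow (2 * t + 1) 0 ++ [2 * t + 1 - 0 + dval (2 * t + 1)] := by
    unfold gmidE
    exact PySem.List.pyGetD_map_pyRange_of_nonneg _ _ _ _ (by omega) (by omega)
  have hblen : (((PySem.List.pyGetD (gmidE t) 0 []).length) : Int) = 2 * t + 2 := by
    rw [hget0, List.length_append, tblRow_length]
    simp
    omega
  rw [hblen]
  rw [PySem.List.foldl_append_singleton_eq_map (fun i => dval (2 * t + 1) + i)]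
  rw [PySem.List.insert_zero, List.nil_append, Prod.mk.injEq]
  constructor
  · rw [tbl, PySem.List.pyRange_one_cons (by omega : (0 : Int) < 2 * t + 2), List.map_cons]
    congr 1
    · rw [row_even_top t ht]
    · rw [show ((0 : Int) + 1) = 1 from by norm_num]
      symm
      rw [PySem.List.pyRange_one 1 (2 * t + 2)]
      unfold gmidE
      rw [PySem.List.pyRange_one 0 (2 * t + 1), List.map_map, List.map_map]
      rw [show ((2 * t + 2 - 1 : Int)).toNat = ((2 * t + 1 - 0 : Int)).toNat from by omega]
      apply List.map_congr_left
      intro k hk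
      rw [List.mem_range] at hk
      simp only [Function.comp_apply]
      rw [show ((1 : Int) + (k : Int)) = (0 + (k : Int)) + 1 from by ring]
      rw [row_even_rest t (0 + (k : Int)) ht (by omega) (by omega)]
  · rw [dval_odd, show (2 * t + 2 : Int) = 2 * (t + 1) from by ring, dval_even]
    ring

lemma body_odd1 (t : Int) (ht : 2 ≤ t) :
    spirale_body (tbl (2 * t)) (2 * (2 * t)) (dval (2 * t)) = (gmidO t, dval (2 * t) + 2 * t) := by
  have hmod : PySem.Int.mod (2 * (2 * t)) 4 = 0 := by
    rw [PySem.Int.mod_eq_emod_of_pos (by omega)]; omega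
  simp only [spirale_body, hmod]
  rw [if_neg (by norm_num), if_neg (by norm_num), if_pos trivial]
  have hlen : ((tbl (2 * t)).length : Int) = 2 * t := by rw [tbl_length]; omega
  simp only [hlen, List.singleton_append]
  rw [tbl, foldl_pySetD_map_int (2 * t) (by omega) (fun i => tblRow (2 * t) i)
      (fun i row => (dval (2 * t) + i) :: row)]
  rw [Prod.mk.injEq]
  constructor
  · rfl
  · rw [List.length_map, PySem.List.length_pyRange_one]
    omega

lemma body_odd2 (t : Int) (ht : 2 ≤ t) :
    spirale_body (gmidO t) (2 * (2 * t) + 1) (dval (2 * t) + 2 * t) = (tbl (2 * t + 1), dval (2 * t + 1)) := by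
  have hmod : PySem.Int.mod (2 * (2 * t) + 1) 4 = 1 := by
    rw [PySem.Int.mod_eq_emod_of_pos (by omega)]; omega
  simp only [spirale_body, hmod]
  rw [if_neg (by norm_num), if_neg (by norm_num), if_neg (by norm_num), if_pos trivial]
  have hget0 : PySem.List.pyGetD (gmidO t) 0 [] = (dval (2 * t) + 0) :: tblRow (2 * t) 0 := by
    unfold gmidO
    exact PySem.List.pyGetD_map_pyRange_of_nonneg _ _ _ _ (by omega) (by omega)
  have hblen : (((PySem.List.pyGetD (gmidO t) 0 []).length) : Int) = 2 * t + 1 := by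
    rw [hget0, List.length_cons, tblRow_length]
    omega
  rw [hblen]
  rw [PySem.List.foldl_append_singleton_eq_map (fun i => dval (2 * t) + 2 * t + i), List.nil_append,
      Prod.mk.injEq]
  constructor
  · rw [tbl, ← row_odd_bottom t ht,
        PySem.List.pyRange_one_succ_right (by omega : (0 : Int) ≤ 2 * t), List.map_append]
    congr 1
    · symm
      unfold gmidO
      apply List.map_congr_left
      intro i hi
      rw [PySem.List.mem_pyRange_one] at hi
      exact row_odd_rest t i ht hi.1 hi.2
  · rw [dval_odd, dval_even]
    ring

-- one pair of loop iterations grows tbl m to tbl (m + 1)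
lemma pair_step (m : Int) (hm : 3 ≤ m) :
    spirale_body (spirale_body (tbl m) (2 * m) (dval m)).1 (2 * m + 1) (spirale_body (tbl m) (2 * m) (dval m)).2
      = (tbl (m + 1), dval (m + 1)) := by
  rcases Int.even_or_odd m with ⟨t, ht⟩ | ⟨t, ht⟩
  · have hm' : m = 2 * t := by omega
    subst hm'
    rw [body_odd1 t (by omega)]
    simpa using body_odd2 t (by omega)
  · have hm' : m = 2 * t + 1 := by omega
    subst hm'
    rw [body_even1 t (by omega)]
    have := body_even2 t (by omega)
    rw [show (2 * (2 * t + 1) + 1 : Int) = 2 * (2 * t + 1) + 1 from rfl]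
    simpa [show (2 * t + 1 + 1 : Int) = 2 * t + 2 from by ring] using this

lemma loop_main (k : Nat) : ∀ (m n : Int), 3 ≤ m → n - m ≤ (k : Int) →
    spirale_loop n (tbl m) (2 * m) (dval m) = tbl (max m n) := by
  induction k with
  | zero =>
    intro m n hm hk
    rw [spirale_loop, dif_neg (by omega : ¬ (2 * m < n * 2))]
    rw [show max m n = m from by omega]
  | succ k ih =>
    intro m n hm hk
    by_cases hnm : n ≤ m
    · rw [spirale_loop, dif_neg (by omega : ¬ (2 * m < n * 2))]
      rw [show max m n = m from by omega]
    · rw [spirale_loop, dif_pos (by omega : 2 * m < n * 2)]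
      simp only
      rw [spirale_loop, dif_pos (by omega : 2 * m + 1 < n * 2)]
      simp only
      rw [pair_step m hm]
      rw [show (2 * m + 1 + 1 : Int) = 2 * (m + 1) from by ring]
      rw [ih (m + 1) n (by omega) (by omega)]
      rw [show max (m + 1) n = max m n from by omega]

-- ===== VERDICT (by name: the statement is the Claim_ definition above) =====
theorem spirale_ulam_detaillee_spec : Claim_equal_spirale_ulam_detaillee := by
  intro n _
  unfold Spec_spirale_ulam_detaillee
  unfold spirale_ulam_detaillee
  rw [show ([[5, 4, 3], [6, 1, 2], [7, 8, 9]] : List (List Int)) = tbl 3 from by decide,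
      show (6 : Int) = 2 * 3 from rfl, show (9 : Int) = dval 3 from by decide,
      loop_main (n - 3).toNat 3 n (by omega) (by omega)]
  have halt : spirale_ulam_detaillee_alt n = tbl (if 4 ≤ n then n else 3) := by
    simp only [spirale_ulam_detaillee_alt, tbl, tblRow]
  rw [halt, show (if 4 ≤ n then n else 3) = max 3 n from by split_ifs <;> omega]
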